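-- pv_equiv track=rewrite | github.com/ESanatkar/PDI1 | labs/week-2/exercise_5.py | personality_mapping
-- ===== SOURCE A (Python) =====
-- def personality_mapping(villagers: dict[str, str]) -> dict[str, list[str]]:
--     """
--     Invert a villager-to-personality mapping to a personality-to-villagers mapping.
--
--     Args:
--         villagers: Dictionary mapping villager name to personality type
--
--     Returns:
--         Dictionary mapping personality type to sorted list of villager names
--     """
--
--     compiled = {}
--
--     for name, personality in villagers.items():
--         if personality not in compiled:
--             compiled[personality] = []
--
--         compiled[personality].append(name)
--
--     for personality in compiled:
--         compiled[personality].sort()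
--
--     return compiled
-- ===== SOURCE B (Python) =====
-- def personality_mapping(villagers: dict[str, str]) -> dict[str, list[str]]:
--     compiled = {personality: [] for personality in villagers.values()}
--     for name in sorted(villagers):
--         compiled[villagers[name]].append(name)
--     return compiled
-- ===== Notes on version B (the rewrite author's own statement) =====
-- stated objective: simpler
-- what changed: B sorts the villager names once globally and groups them in a single pass into a dict pre-seeded with the personalities, instead of A's group-then-sort-each-bucket two-phase loop.
import Mathlib
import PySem

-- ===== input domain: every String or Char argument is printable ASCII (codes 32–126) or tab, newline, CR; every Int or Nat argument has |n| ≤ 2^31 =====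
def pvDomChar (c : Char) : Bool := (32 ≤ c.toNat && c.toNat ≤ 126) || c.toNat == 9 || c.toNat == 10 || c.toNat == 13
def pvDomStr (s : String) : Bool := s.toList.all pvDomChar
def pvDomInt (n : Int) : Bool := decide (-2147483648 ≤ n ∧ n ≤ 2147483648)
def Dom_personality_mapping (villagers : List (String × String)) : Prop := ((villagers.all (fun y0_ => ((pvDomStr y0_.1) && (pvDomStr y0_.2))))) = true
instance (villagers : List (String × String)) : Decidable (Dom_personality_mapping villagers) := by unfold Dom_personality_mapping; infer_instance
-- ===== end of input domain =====

-- B replaces A's group-then-sort-each-bucket shape by one global sort of the names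
-- followed by a single grouping pass (objective: simpler).  Both ports read the
-- association-list input through PySem.Dict.ofList, modelling the Python dict the
-- function receives (duplicate keys: last value wins, first position kept).

-- ===== PORT A =====
-- 'if personality not in compiled: compiled[personality] = []' then
-- 'compiled[personality].append(name)', transliterated step for step.
def pmStepA (c : PySem.Dict String (List String)) (p : String × String) : PySem.Dict String (List String) :=
  let c1 := if c.contains p.2 then c else c.insert p.2 []
  c1.modify p.2 [] (· ++ [p.1])

def personality_mapping (villagers : List (String × String)) : List (String × List String) :=
  let d := PySem.Dict.ofList villagers
  let compiled := d.items.foldl pmStepA PySem.Dict.empty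
  -- 'for personality in compiled: compiled[personality].sort()'
  let compiled2 := compiled.keys.foldl
    (fun c k => c.modify k [] (fun l => PySem.List.sorted l (fun x => x) false)) compiled
  compiled2.items

-- ===== PORT B =====
def personality_mapping_alt (villagers : List (String × String)) : List (String × List String) :=
  let d := PySem.Dict.ofList villagers
  -- compiled = {personality: [] for personality in villagers.values()}
  let compiled := d.values.foldl (fun c p => c.insert p ([] : List String)) PySem.Dict.empty
  -- for name in sorted(villagers): compiled[villagers[name]].append(name)
  -- (villagers[name] is d.getD name "": name is always a key here, so exact)
  let compiled2 := (PySem.List.sorted d.keys (fun x => x) false).foldl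
    (fun c name => c.modify (d.getD name "") [] (· ++ [name])) compiled
  compiled2.items

-- ===== PRECONDITION & SPEC =====
def Spec_personality_mapping (villagers : List (String × String)) (out : List (String × List String)) : Prop := out = personality_mapping_alt villagers
instance (villagers : List (String × String)) (out : List (String × List String)) : Decidable (Spec_personality_mapping villagers out) := by unfold Spec_personality_mapping; infer_instance

-- ===== CLAIM (what is proved, stated in full; the proofs are below) =====
def Claim_equal_personality_mapping : Prop := ∀ (villagers : List (String × String)), Dom_personality_mapping villagers → Spec_personality_mapping villagers (personality_mapping villagers)

-- ===== LEMMAS AND PROOFS =====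

-- Set.update by elements already present is the identity.
lemma set_update_of_subset (s : PySem.Set String) (xs : List String)
    (h : ∀ x ∈ xs, x ∈ s) : PySem.Set.update s xs = s := by
  rw [PySem.Set.update_eq_append_filter]
  have hnil : ((PySem.Set.ofList xs).filter (fun y => !(PySem.Set.contains s y))) = [] := by
    refine List.filter_eq_nil_iff.mpr (fun y hy => ?_)
    simpa using h y ((PySem.Set.mem_ofList xs y).mp hy)
  rw [hnil, List.append_nil]

-- A grouping loop 'for a in l: c[key a].append(val a)' (with default []),
-- keyed through arbitrary projections (covers both ports' grouping folds).
lemma getD_group_fold {α : Type} (l : List α) (key : α → String) (val : α → String)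
    (c0 : PySem.Dict String (List String)) (k : String) :
    (l.foldl (fun c a => c.modify (key a) [] (· ++ [val a])) c0).getD k []
      = c0.getD k [] ++ (l.filter (fun a => key a == k)).map val := by
  induction l generalizing c0 with
  | nil => simp
  | cons a t ih =>
    simp only [List.foldl_cons, ih, List.filter_cons]
    by_cases hk : key a = k
    · subst hk; simp [PySem.Dict.getD_modify_self]
    · simp [PySem.Dict.getD_modify_of_ne c0 ([] : List String)
        (fun x => x ++ [val a]) (Ne.symm hk), hk]

-- A fold inserting [] at every key leaves every getD · [] at [].
lemma getD_insert_nil_fold (xs : List String) (c0 : PySem.Dict String (List String))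
    (h : ∀ j, c0.getD j [] = []) (j : String) :
    (xs.foldl (fun c p => c.insert p ([] : List String)) c0).getD j [] = [] := by
  induction xs generalizing c0 with
  | nil => exact h j
  | cons x t ih =>
    refine ih _ (fun j' => ?_)
    rw [PySem.Dict.getD_insert]
    split <;> simp [h]

-- A's step is exactly the modify-with-default step.
lemma pmStepA_eq (c : PySem.Dict String (List String)) (p : String × String) :
    pmStepA c p = c.modify p.2 [] (· ++ [p.1]) := by
  by_cases hc : c.contains p.2 = true
  · simp [pmStepA, hc]
  · have hc' : c.contains p.2 = false := by simpa using hc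
    simp only [pmStepA, hc', Bool.false_eq_true, if_false, PySem.Dict.modify]
    rw [PySem.Dict.getD_insert_self, PySem.Dict.insert_insert_self,
        PySem.Dict.getD_of_not_contains c ([] : List String) hc']

-- The sort pass: getD after sorting every bucket listed in ks (ks nodup).
lemma getD_sort_fold (ks : List String) (hnd : ks.Nodup)
    (c : PySem.Dict String (List String)) (j : String) :
    (ks.foldl (fun c k => c.modify k [] (fun l => PySem.List.sorted l (fun x => x) false)) c).getD j []
      = if j ∈ ks then PySem.List.sorted (c.getD j []) (fun x => x) false else c.getD j [] := by
  induction ks generalizing c with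
  | nil => simp
  | cons k t ih =>
    rcases List.nodup_cons.mp hnd with ⟨hk, hnt⟩
    by_cases hj : j = k
    · subst hj
      rw [List.foldl_cons, ih hnt, if_neg hk, PySem.Dict.getD_modify_self]
      simp
    · rw [List.foldl_cons, ih hnt,
        PySem.Dict.getD_modify_of_ne c ([] : List String)
          (fun l => PySem.List.sorted l (fun x => x) false) hj]
      simp [hj]

-- Every looked-up value of a key is among the values.
lemma getD_mem_values (d : PySem.Dict String String) (hnd : d.keys.Nodup)
    (n : String) (hn : n ∈ d.keys) : d.getD n "" ∈ d.values := by
  rcases List.mem_map.mp hn with ⟨q, hq, rfl⟩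
  rw [PySem.Dict.getD_of_mem_items d (k := q.1) (v := q.2) (by simpa using hq) hnd]
  exact List.mem_map.mpr ⟨q, hq, rfl⟩

-- Filtering a sorted list is sorting the filtered list.
lemma filter_sorted_id (xs : List String) (P : String → Bool) :
    (PySem.List.sorted xs (fun x => x) false).filter P
      = PySem.List.sorted (xs.filter P) (fun x => x) false := by
  refine (PySem.List.sorted_id_eq_of_perm_of_pairwise _ _ ?_ ?_).symm
  · exact (PySem.List.sorted_perm xs (fun x => x) false).filter P
  · exact List.Pairwise.sublist List.filter_sublist
      (PySem.List.sorted_pairwise xs (fun x => x))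

-- The canonical result both ports compute: personalities in first-appearance
-- order, each with the sorted list of its villagers.
def canonical (d : PySem.Dict String String) : List (String × List String) :=
  (PySem.Set.ofList d.values).map
    (fun p => (p, PySem.List.sorted ((d.items.filter (fun q => q.2 == p)).map (·.1)) (fun x => x) false))

lemma portA_eq_canonical (d : PySem.Dict String String) :
    ((d.items.foldl pmStepA PySem.Dict.empty).keys.foldl
        (fun c k => c.modify k [] (fun l => PySem.List.sorted l (fun x => x) false))
        (d.items.foldl pmStepA PySem.Dict.empty)).items = canonical d := by
  set cA := d.items.foldl pmStepA PySem.Dict.empty with hcA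
  have hstep : cA = d.items.foldl (fun c p => c.modify p.2 [] (· ++ [p.1])) PySem.Dict.empty := by
    rw [hcA]
    exact PySem.List.foldl_congr_mem _ _ _ _ (fun acc x _ => pmStepA_eq acc x)
  have hkeys : cA.keys = PySem.Set.ofList (d.items.map (·.2)) := by
    rw [hstep,
      PySem.Dict.keys_foldl_modify_key d.items (fun p => p.2) [] (fun _ p => (· ++ [p.1])),
      PySem.Dict.keys_empty, PySem.Set.update_nil_left]
  have hnodA : cA.keys.Nodup := by
    rw [hkeys]; exact PySem.Set.nodup_ofList _
  have hgetD : ∀ k, cA.getD k [] = (d.items.filter (fun q => q.2 == k)).map (·.1) := by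
    intro k
    rw [hstep, getD_group_fold d.items (fun p => p.2) (fun p => p.1) PySem.Dict.empty k]
    simp
  set cA2 := cA.keys.foldl
    (fun c k => c.modify k [] (fun l => PySem.List.sorted l (fun x => x) false)) cA with hcA2
  have hkeys2 : cA2.keys = cA.keys := by
    rw [hcA2,
      PySem.Dict.keys_foldl_modify_key cA.keys (fun k => k) []
        (fun _ _ => (fun l => PySem.List.sorted l (fun x => x) false))]
    simp only [List.map_id']
    exact set_update_of_subset _ _ (fun x hx => hx)
  have hnod2 : cA2.keys.Nodup := by rw [hkeys2]; exact hnodA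
  show cA2.items = canonical d
  rw [PySem.Dict.items_eq_map_keys cA2 hnod2 ([] : List String), hkeys2, hkeys]
  have hvals : d.values = d.items.map (·.2) := rfl
  unfold canonical
  rw [hvals]
  refine List.map_congr_left (fun p hp => ?_)
  rw [hcA2, getD_sort_fold cA.keys hnodA cA p,
    if_pos (by rw [hkeys]; exact hp), hgetD]

lemma portB_eq_canonical (d : PySem.Dict String String) (hnd : d.keys.Nodup) :
    (((PySem.List.sorted d.keys (fun x => x) false).foldl
        (fun c name => c.modify (d.getD name "") [] (· ++ [name]))
        (d.values.foldl (fun c p => c.insert p ([] : List String)) PySem.Dict.empty)).items)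
      = canonical d := by
  set cB := d.values.foldl (fun c p => c.insert p ([] : List String)) PySem.Dict.empty with hcB
  have hkeysB : cB.keys = PySem.Set.ofList d.values := by
    rw [hcB, PySem.Dict.keys_foldl_insert d.values (fun _ _ => ([] : List String)),
      PySem.Dict.keys_empty, PySem.Set.update_nil_left]
  have hnodB : cB.keys.Nodup := by rw [hkeysB]; exact PySem.Set.nodup_ofList _
  have hgetB : ∀ j, cB.getD j [] = [] := by
    intro j
    rw [hcB]
    exact getD_insert_nil_fold d.values PySem.Dict.empty (fun j' => by simp) j
  set ns := PySem.List.sorted d.keys (fun x => x) false with hns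
  set cB2 := ns.foldl (fun c name => c.modify (d.getD name "") [] (· ++ [name])) cB with hcB2
  have hkeys2 : cB2.keys = cB.keys := by
    rw [hcB2,
      PySem.Dict.keys_foldl_modify_key ns (fun name => d.getD name "") []
        (fun _ name => (· ++ [name]))]
    refine set_update_of_subset _ _ (fun x hx => ?_)
    rcases List.mem_map.mp hx with ⟨n, hn, rfl⟩
    rw [hkeysB]
    refine (PySem.Set.mem_ofList _ _).mpr (getD_mem_values d hnd n ?_)
    rw [hns] at hn
    exact (PySem.List.mem_sorted _ _ _ _).mp hn
  have hnod2 : cB2.keys.Nodup := by rw [hkeys2]; exact hnodB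
  have hgetD2 : ∀ p, cB2.getD p []
      = PySem.List.sorted ((d.items.filter (fun q => q.2 == p)).map (·.1)) (fun x => x) false := by
    intro p
    rw [hcB2, getD_group_fold ns (fun name => d.getD name "") (fun name => name) cB p,
      hgetB, List.nil_append, List.map_id']
    have h2 : d.keys.filter (fun n => d.getD n "" == p)
        = (d.items.filter (fun q => q.2 == p)).map (·.1) := by
      have hk : d.keys = d.items.map (·.1) := rfl
      rw [hk, List.filter_map]
      refine congrArg (List.map _) (List.filter_congr (fun q hq => ?_))
      have hv := PySem.Dict.getD_of_mem_items d (k := q.1) (v := q.2) (by simpa using hq) hnd ""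
      simp [Function.comp, hv]
    rw [hns, filter_sorted_id, h2]
  show cB2.items = canonical d
  rw [PySem.Dict.items_eq_map_keys cB2 hnod2 ([] : List String), hkeys2, hkeysB]
  unfold canonical
  exact List.map_congr_left (fun p _ => by rw [hgetD2 p])

-- ===== VERDICT (by name: the statement is the Claim_ definition above) =====
theorem personality_mapping_spec : Claim_equal_personality_mapping := by
  intro villagers _
  unfold Spec_personality_mapping
  simp only [personality_mapping, personality_mapping_alt]
  rw [portA_eq_canonical (PySem.Dict.ofList villagers),
      portB_eq_canonical _ (PySem.Dict.nodup_keys_ofList villagers)]
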